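-- pv_equiv track=rewrite | github.com/renatobdo/arbotag | app.py | consolidar_itens_por_maior_valor
-- ===== SOURCE A (Python) =====
-- from typing import List, Dict, Tuple, Optional
--
-- def normalizar_texto(texto: Optional[str]) -> str:
--     if texto is None:
--         return ""
--     return str(texto).strip().lower()
--
-- def consolidar_itens_por_maior_valor(itens: List[Tuple[str, int]]) -> List[Tuple[str, int]]:
--     mapa = {}
--     nome_original = {}
--
--     for nome, qtd in itens:
--         chave = normalizar_texto(nome)
--         if chave not in mapa or qtd > mapa[chave]:
--             mapa[chave] = qtd
--             nome_original[chave] = nome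
--
--     return sorted(
--         [(nome_original[ch], mapa[ch]) for ch in mapa],
--         key=lambda x: x[1],
--         reverse=True
--     )
-- ===== SOURCE B (Python) =====
-- def consolidar_itens_por_maior_valor(itens):
--     def _norm(t):
--         return "" if t is None else str(t).strip().lower()
--     chaves = list(dict.fromkeys(_norm(n) for n, _ in itens))
--     res = [max((p for p in itens if _norm(p[0]) == ch), key=lambda p: p[1])
--            for ch in chaves]
--     return sorted(res, key=lambda p: p[1], reverse=True)
-- ===== Notes on version B (the rewrite author's own statement) =====
-- stated objective: alternative
-- what changed: Replaces A's single-pass pair of dicts (running max + original-name memo) by a group-by decomposition: ordered dedup of normalized keys, then per key a max(..., key=qty) over the matching items (Python's max returns the first maximal, matching A's strict-> first-max-wins rule), then the same stable descending sort.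
import Mathlib
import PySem

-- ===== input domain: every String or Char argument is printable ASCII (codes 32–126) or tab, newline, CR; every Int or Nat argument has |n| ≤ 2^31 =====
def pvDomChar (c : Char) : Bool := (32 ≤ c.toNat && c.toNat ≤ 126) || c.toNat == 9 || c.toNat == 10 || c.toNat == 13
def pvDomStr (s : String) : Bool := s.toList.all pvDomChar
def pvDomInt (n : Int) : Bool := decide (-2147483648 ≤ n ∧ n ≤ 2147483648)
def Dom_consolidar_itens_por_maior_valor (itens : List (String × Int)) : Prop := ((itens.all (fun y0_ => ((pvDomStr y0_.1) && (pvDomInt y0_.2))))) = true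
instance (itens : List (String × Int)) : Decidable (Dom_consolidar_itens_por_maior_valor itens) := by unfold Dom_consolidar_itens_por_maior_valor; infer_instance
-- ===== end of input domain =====

-- B replaces A's single-pass pair of dicts by a group-by decomposition (ordered dedup of
-- normalized keys, per-key first-max, same stable descending sort); objective: alternative.

-- normalizar_texto on a str argument (the None branch is unreachable for str inputs)
def pvNorm (s : String) : String := PySem.Str.lower (PySem.Str.strip s)

-- ===== PORT A =====
-- one loop step: 'if chave not in mapa or qtd > mapa[chave]: mapa[chave]=qtd; nome_original[chave]=nome'
def pvStepA (st : PySem.Dict String Int × PySem.Dict String String) (p : String × Int) :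
    PySem.Dict String Int × PySem.Dict String String :=
  match st.1.get? (pvNorm p.1) with
  | none => (st.1.insert (pvNorm p.1) p.2, st.2.insert (pvNorm p.1) p.1)
  | some v => if v < p.2 then (st.1.insert (pvNorm p.1) p.2, st.2.insert (pvNorm p.1) p.1) else st

-- 'nome_original[ch]' / 'mapa[ch]' always succeed (both dicts share their keys), so getD's
-- defaults are never read
def consolidar_itens_por_maior_valor (itens : List (String × Int)) : List (String × Int) :=
  PySem.List.sorted
    (((itens.foldl pvStepA (PySem.Dict.empty, PySem.Dict.empty)).1.keys).map
      (fun ch => ((itens.foldl pvStepA (PySem.Dict.empty, PySem.Dict.empty)).2.getD ch "",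
                  (itens.foldl pvStepA (PySem.Dict.empty, PySem.Dict.empty)).1.getD ch 0)))
    (fun x => x.2) true

-- ===== PORT B =====
-- max(...) over each key's group; the group is nonempty for every ch in chaves, so max? is
-- always some and getD's default is never read (none = Python's ValueError)
def consolidar_itens_por_maior_valor_alt (itens : List (String × Int)) : List (String × Int) :=
  PySem.List.sorted
    ((PySem.List.dedup (itens.map (fun p => pvNorm p.1))).map (fun ch =>
      (PySem.List.max? (itens.filter (fun p => pvNorm p.1 == ch)) (fun p => p.2)).getD ("", 0)))
    (fun p => p.2) true

-- ===== PRECONDITION & SPEC =====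
def Spec_consolidar_itens_por_maior_valor (itens : List (String × Int)) (out : List (String × Int)) : Prop := out = consolidar_itens_por_maior_valor_alt itens
instance (itens : List (String × Int)) (out : List (String × Int)) : Decidable (Spec_consolidar_itens_por_maior_valor itens out) := by unfold Spec_consolidar_itens_por_maior_valor; infer_instance

-- ===== CLAIM (what is proved, stated in full; the proofs are below) =====
def Claim_equal_consolidar_itens_por_maior_valor : Prop := ∀ (itens : List (String × Int)), Dom_consolidar_itens_por_maior_valor itens → Spec_consolidar_itens_por_maior_valor itens (consolidar_itens_por_maior_valor itens)

-- ===== LEMMAS AND PROOFS =====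

-- Python max(key=…) steps over an appended element: replace only on strictly greater key
theorem pv_max?_append_singleton (l : List (String × Int)) (x : String × Int) :
    PySem.List.max? (l ++ [x]) (fun p => p.2) =
      match PySem.List.max? l (fun p => p.2) with
      | none => some x
      | some m => if m.2 < x.2 then some x else some m := by
  simp only [PySem.List.max?, List.foldl_append, List.foldl_cons, List.foldl_nil]
  rcases List.foldl _ none l with _ | m
  · rfl
  · simp

theorem pv_dedup_append_singleton (l : List String) (x : String) :
    PySem.List.dedup (l ++ [x]) = PySem.Set.add (PySem.List.dedup l) x := by
  simp [PySem.List.dedup, PySem.Set.ofList_eq_foldl, List.foldl_append]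

-- loop invariant for A's fold: keys in first-occurrence order, and both dicts hold the
-- first-max representative of each key's group
theorem pvA_inv (l : List (String × Int)) :
    (l.foldl pvStepA (PySem.Dict.empty, PySem.Dict.empty)).1.keys
      = PySem.List.dedup (l.map (fun p => pvNorm p.1)) ∧
    ∀ ch : String,
      (l.foldl pvStepA (PySem.Dict.empty, PySem.Dict.empty)).1.get? ch
        = (PySem.List.max? (l.filter (fun p => pvNorm p.1 == ch)) (fun p => p.2)).map (·.2) ∧
      (l.foldl pvStepA (PySem.Dict.empty, PySem.Dict.empty)).2.get? ch
        = (PySem.List.max? (l.filter (fun p => pvNorm p.1 == ch)) (fun p => p.2)).map (·.1) := by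
  induction l using List.reverseRecOn with
  | nil => simp [PySem.List.dedup, PySem.Set.ofList, PySem.List.max?, PySem.Dict.get?_empty, PySem.Dict.keys_empty]
  | append_singleton l x ih =>
    obtain ⟨hk, hget⟩ := ih
    rw [List.foldl_append]
    simp only [List.foldl_cons, List.foldl_nil]
    set D := l.foldl pvStepA (PySem.Dict.empty, PySem.Dict.empty) with hD
    constructor
    · -- keys
      rw [List.map_append, List.map_cons, List.map_nil, pv_dedup_append_singleton, ← hk]
      cases hx : D.1.get? (pvNorm x.1) with
      | none =>
        have hnm : pvNorm x.1 ∉ D.1.keys := (PySem.Dict.get?_eq_none_iff_not_mem_keys _ _).mp hx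
        have hc : D.1.contains (pvNorm x.1) = false := by
          rw [PySem.Dict.contains_eq_isSome_get?, hx]; rfl
        simp only [pvStepA, hx]
        rw [PySem.Dict.keys_insert_of_not_contains _ _ hc]
        simp [PySem.Set.add, PySem.Set.contains, hnm]
      | some v =>
        have hc : D.1.contains (pvNorm x.1) = true := by
          rw [PySem.Dict.contains_eq_isSome_get?, hx]; rfl
        have hnm : pvNorm x.1 ∈ D.1.keys := by
          by_contra h
          rw [(PySem.Dict.get?_eq_none_iff_not_mem_keys _ _).mpr h] at hx; exact (by simp at hx)
        have hadd : PySem.Set.add D.1.keys (pvNorm x.1) = D.1.keys := by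
          simp [PySem.Set.add, PySem.Set.contains, hnm]
        simp only [pvStepA, hx]
        split_ifs
        · rw [PySem.Dict.keys_insert_of_contains _ _ hc, hadd]
        · rw [hadd]
    · -- lookups
      intro ch
      rw [List.filter_append]
      by_cases hceq : pvNorm x.1 = ch
      · have hfx : List.filter (fun p => pvNorm p.1 == ch) [x] = [x] := by simp [hceq]
        rw [hfx, pv_max?_append_singleton]
        cases hx : D.1.get? (pvNorm x.1) with
        | none =>
          have h1 := (hget ch).1
          rw [hceq] at hx
          have hmax : PySem.List.max? (l.filter (fun p => pvNorm p.1 == ch)) (fun p => p.2) = none := by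
            rw [hx] at h1
            cases hmm : PySem.List.max? (l.filter (fun p => pvNorm p.1 == ch)) (fun p => p.2) with
            | none => rfl
            | some m => rw [hmm] at h1; simp at h1
          rw [hmax]
          simp only [pvStepA, hceq, hx]
          constructor
          · rw [PySem.Dict.get?_insert]; simp
          · rw [PySem.Dict.get?_insert]; simp
        | some v =>
          have h1 := (hget ch).1; have h2 := (hget ch).2
          rw [hceq] at hx
          obtain ⟨m, hmm⟩ : ∃ m, PySem.List.max? (l.filter (fun p => pvNorm p.1 == ch)) (fun p => p.2) = some m := by
            cases hmm : PySem.List.max? (l.filter (fun p => pvNorm p.1 == ch)) (fun p => p.2) with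
            | none => rw [hmm, hx] at h1; simp at h1
            | some m => exact ⟨m, rfl⟩
          have hv : m.2 = v := by rw [hmm, hx] at h1; simp at h1; omega
          rw [hmm]
          simp only [pvStepA, hceq, hx]
          by_cases hlt : v < x.2
          · rw [if_pos (by omega : m.2 < x.2), if_pos hlt]
            constructor
            · rw [PySem.Dict.get?_insert]; simp
            · rw [PySem.Dict.get?_insert]; simp
          · rw [if_neg (by omega : ¬ m.2 < x.2), if_neg hlt]
            exact ⟨by rw [h1, hmm], by rw [h2, hmm]⟩
      · have hfx : List.filter (fun p => pvNorm p.1 == ch) [x] = [] := by simp [hceq]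
        rw [hfx, List.append_nil]
        cases hx : D.1.get? (pvNorm x.1) with
        | none =>
          simp only [pvStepA, hx]
          constructor
          · rw [PySem.Dict.get?_insert, if_neg (fun h => hceq h.symm)]; exact (hget ch).1
          · rw [PySem.Dict.get?_insert, if_neg (fun h => hceq h.symm)]; exact (hget ch).2
        | some v =>
          simp only [pvStepA, hx]
          split_ifs
          · constructor
            · rw [PySem.Dict.get?_insert, if_neg (fun h => hceq h.symm)]; exact (hget ch).1
            · rw [PySem.Dict.get?_insert, if_neg (fun h => hceq h.symm)]; exact (hget ch).2
          · exact hget ch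

theorem pv_presort_eq (itens : List (String × Int)) :
    ((itens.foldl pvStepA (PySem.Dict.empty, PySem.Dict.empty)).1.keys).map
        (fun ch => ((itens.foldl pvStepA (PySem.Dict.empty, PySem.Dict.empty)).2.getD ch "",
                    (itens.foldl pvStepA (PySem.Dict.empty, PySem.Dict.empty)).1.getD ch 0))
      = (PySem.List.dedup (itens.map (fun p => pvNorm p.1))).map (fun ch =>
          (PySem.List.max? (itens.filter (fun p => pvNorm p.1 == ch)) (fun p => p.2)).getD ("", 0)) := by
  obtain ⟨hk, hget⟩ := pvA_inv itens
  rw [hk]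
  apply List.map_congr_left
  intro ch hch
  have hmem : ch ∈ itens.map (fun p => pvNorm p.1) := by
    simpa [PySem.List.dedup, PySem.Set.mem_ofList] using hch
  obtain ⟨p, hp, hpch⟩ := List.mem_map.mp hmem
  have hne : itens.filter (fun p => pvNorm p.1 == ch) ≠ [] := by
    intro h
    have : p ∈ itens.filter (fun p => pvNorm p.1 == ch) := by
      simp [List.mem_filter, hp, hpch]
    simp [h] at this
  obtain ⟨m, hm⟩ : ∃ m, PySem.List.max? (itens.filter (fun p => pvNorm p.1 == ch)) (fun p => p.2) = some m := by
    cases hmax : PySem.List.max? (itens.filter (fun p => pvNorm p.1 == ch)) (fun p => p.2) with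
    | none => exact absurd ((PySem.List.max?_eq_none_iff _ _).mp hmax) hne
    | some m => exact ⟨m, rfl⟩
  obtain ⟨h1, h2⟩ := hget ch
  rw [hm] at h1 h2
  simp [PySem.Dict.getD_eq_get?_getD, h1, h2, hm]

-- ===== VERDICT (by name: the statement is the Claim_ definition above) =====
theorem consolidar_itens_por_maior_valor_spec : Claim_equal_consolidar_itens_por_maior_valor := by
  intro itens _
  unfold Spec_consolidar_itens_por_maior_valor consolidar_itens_por_maior_valor consolidar_itens_por_maior_valor_alt
  rw [pv_presort_eq]
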